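-- pv_equiv track=rewrite | github.com/dvasilev-git/alert-template-generator | convert_to_template.py | extract_common_fields
-- ===== SOURCE A (Python) =====
-- from typing import Dict, List, Any, Optional
--
-- def extract_common_fields(alert_rules: List[Dict[str, Any]]) -> Dict[str, Any]:
--     """Extract common fields from a group of alerts."""
--     if not alert_rules:
--         return {}
--
--     # Use first alert as base
--     base = alert_rules[0].copy()
--
--     # Common annotations (from first alert)
--     common = {
--         'annotations': base.get('annotations', {}).copy(),
--         'labels': {}
--     }
--
--     # Extract labels that are common across all alerts (excluding severity)
--     if alert_rules:
--         first_labels = alert_rules[0].get('labels', {})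
--         for key, value in first_labels.items():
--             if key not in ['severity', 'severity_order']:
--                 # Check if same in all alerts
--                 if all(rule.get('labels', {}).get(key) == value for rule in alert_rules):
--                     common['labels'][key] = value
--
--     return common
-- ===== SOURCE B (Python) =====
-- from typing import Dict, List, Any
--
--
-- def extract_common_fields(alert_rules: List[Dict[str, Any]]) -> Dict[str, Any]:
--     """Extract common fields from a group of alerts."""
--     if not alert_rules:
--         return {}
--
--     # Count how many rules carry each exact (key, value) label pair; a pair is
--     # common iff its count equals the number of rules (each rule's labels dict
--     # contributes any given pair at most once).
--     n = len(alert_rules)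
--     counts = {}
--     for rule in alert_rules:
--         for item in rule.get('labels', {}).items():
--             counts[item] = counts.get(item, 0) + 1
--
--     first = alert_rules[0]
--     labels = {k: v for k, v in first.get('labels', {}).items()
--               if k not in ('severity', 'severity_order') and counts[(k, v)] == n}
--
--     return {'annotations': dict(first.get('annotations', {})),
--             'labels': labels}
-- ===== Notes on version B (the rewrite author's own statement) =====
-- stated objective: alternative
-- what changed: A tests each first-alert label key with an inner all() scan over every rule; B makes one counting pass over all rules' (key, value) label pairs and keeps a first-alert pair iff its count equals the number of rules.
import Mathlib
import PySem

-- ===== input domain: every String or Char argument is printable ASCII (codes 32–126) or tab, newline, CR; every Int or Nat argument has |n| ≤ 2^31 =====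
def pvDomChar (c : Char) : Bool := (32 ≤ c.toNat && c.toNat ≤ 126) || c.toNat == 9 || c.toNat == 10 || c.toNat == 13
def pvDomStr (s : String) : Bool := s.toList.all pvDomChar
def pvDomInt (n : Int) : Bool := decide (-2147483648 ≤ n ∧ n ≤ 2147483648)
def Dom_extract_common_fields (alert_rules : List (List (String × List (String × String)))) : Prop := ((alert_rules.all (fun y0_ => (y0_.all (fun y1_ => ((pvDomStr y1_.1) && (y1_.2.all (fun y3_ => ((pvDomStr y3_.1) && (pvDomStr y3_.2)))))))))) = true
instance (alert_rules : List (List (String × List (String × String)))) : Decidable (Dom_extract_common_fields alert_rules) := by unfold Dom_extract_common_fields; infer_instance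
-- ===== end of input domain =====

-- One honest line: B replaces A's per-key all()-scan over every rule by one counting pass
-- over all (key, value) label pairs, keeping a first-alert pair iff its count equals the
-- number of rules (objective: alternative algorithm, same asymptotic cost).

-- shared helper: Python's rule.get('labels', {}) as a dict
def pvLabels (rule : List (String × List (String × String))) : PySem.Dict String String :=
  PySem.Dict.ofList ((PySem.Dict.ofList rule).getD "labels" [])

-- ===== PORT A =====
def extract_common_fields (alert_rules : List (List (String × List (String × String)))) : List (String × List (String × String)) :=
  match alert_rules with
  | [] => []
  | r0 :: _ =>
    -- base = alert_rules[0].copy(); common = {'annotations': base.get('annotations', {}).copy(), 'labels': {}}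
    let base := PySem.Dict.ofList r0
    let ann := PySem.Dict.ofList (base.getD "annotations" [])
    let firstLabels := PySem.Dict.ofList (base.getD "labels" [])
    -- for key, value in first_labels.items(): if key not in [...]: if all(...): common['labels'][key] = value
    let lbls := firstLabels.items.foldl
      (fun acc kv =>
        if kv.1 == "severity" || kv.1 == "severity_order" then acc
        else if alert_rules.all (fun rule => (pvLabels rule).get? kv.1 == some kv.2) then
          acc.insert kv.1 kv.2
        else acc)
      PySem.Dict.empty
    [("annotations", ann.items), ("labels", lbls.items)]

-- ===== PORT B =====
def extract_common_fields_alt (alert_rules : List (List (String × List (String × String)))) : List (String × List (String × String)) :=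
  match alert_rules with
  | [] => []
  | r0 :: _ =>
    -- n = len(alert_rules); counts = {}; for rule: for item in labels.items(): counts[item] = counts.get(item, 0) + 1
    let n : Int := (alert_rules.length : Int)
    let counts : PySem.Dict (String × String) Int :=
      alert_rules.foldl
        (fun c rule => (pvLabels rule).items.foldl
          (fun c it => c.insert it (c.getD it 0 + 1)) c)
        PySem.Dict.empty
    -- labels = {k: v for k, v in first labels if k not in (...) and counts[(k, v)] == n}
    -- (counts[(k, v)] is an exact lookup in Python; the key is always present because the
    --  first rule itself contributed it, so getD with default 0 computes the same value)
    let labels := (pvLabels r0).items.filter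
      (fun kv => !(kv.1 == "severity" || kv.1 == "severity_order") && counts.getD kv 0 == n)
    [("annotations", (PySem.Dict.ofList ((PySem.Dict.ofList r0).getD "annotations" [])).items),
     ("labels", labels)]

-- ===== PRECONDITION & SPEC =====
def Spec_extract_common_fields (alert_rules : List (List (String × List (String × String)))) (out : List (String × List (String × String))) : Prop := out = extract_common_fields_alt alert_rules
instance (alert_rules : List (List (String × List (String × String)))) (out : List (String × List (String × String))) : Decidable (Spec_extract_common_fields alert_rules out) := by unfold Spec_extract_common_fields; infer_instance

-- ===== CLAIM (what is proved, stated in full; the proofs are below) =====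
def Claim_equal_extract_common_fields : Prop := ∀ (alert_rules : List (List (String × List (String × String)))), Dom_extract_common_fields alert_rules → Spec_extract_common_fields alert_rules (extract_common_fields alert_rules)

-- ===== LEMMAS AND PROOFS =====

-- A's skip/insert fold over distinct fresh keys builds exactly the filtered items list.
theorem pv_foldl_insert_items (L : List (String × String)) (s c : String × String → Bool)
    (hnd : (L.map Prod.fst).Nodup) :
    (L.foldl (fun (acc : PySem.Dict String String) kv =>
        if s kv then acc else if c kv then acc.insert kv.1 kv.2 else acc) PySem.Dict.empty).items
      = L.filter (fun kv => !s kv && c kv) := by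
  have hfun : (fun (acc : PySem.Dict String String) kv =>
      if s kv then acc else if c kv then acc.insert kv.1 kv.2 else acc)
      = fun acc kv => if (!s kv && c kv) then acc.insert kv.1 kv.2 else acc := by
    funext acc kv
    by_cases hs : s kv <;> by_cases hc : c kv <;> simp [hs, hc]
  rw [hfun, ← List.foldl_filter]
  have hfresh : ∀ kv ∈ L.filter (fun kv => !s kv && c kv),
      (PySem.Dict.empty : PySem.Dict String String).contains kv.1 = false := by
    intro kv _; simp [pysem]
  have hnd' : ((L.filter (fun kv => !s kv && c kv)).map Prod.fst).Nodup :=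
    ((List.filter_sublist (l := L)).map Prod.fst).nodup hnd
  have := PySem.Dict.items_foldl_insert_fresh (l := L.filter (fun kv => !s kv && c kv))
    (d := PySem.Dict.empty) (k := Prod.fst) (v := Prod.snd) hfresh hnd'
  simpa using this

-- B's nested counting loop, looked up at p, adds each rule's item count of p.
theorem pv_counts_getD (rules : List (List (String × List (String × String))))
    (p : String × String) :
    ∀ d : PySem.Dict (String × String) Int,
      (rules.foldl (fun c rule => (pvLabels rule).items.foldl
          (fun c it => c.insert it (c.getD it 0 + 1)) c) d).getD p 0
        = d.getD p 0 + (rules.map (fun rule => ((pvLabels rule).items.count p : Int))).sum := by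
  induction rules with
  | nil => intro d; simp
  | cons r rules ih =>
    intro d
    simp only [List.foldl_cons, ih, List.map_cons, List.sum_cons,
      PySem.Dict.getD_foldl_insert_add_one]
    ring

theorem pv_rule_count (rule : List (String × List (String × String))) (p : String × String) :
    ((pvLabels rule).items.count p : Int)
      = if (pvLabels rule).get? p.1 == some p.2 then 1 else 0 := by
  have hnd : ((pvLabels rule).items.map Prod.fst).Nodup := PySem.Dict.nodup_keys_ofList _
  have hnditems : (pvLabels rule).items.Nodup := hnd.of_map
  by_cases hmem : p ∈ (pvLabels rule).items
  · have h1 : (pvLabels rule).items.count p = 1 := List.count_eq_one_of_mem hnditems hmem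
    have hget : (pvLabels rule).get? p.1 = some p.2 := by
      have := PySem.Dict.get?_of_mem_items (d := pvLabels rule) (k := p.1) (v := p.2)
        (by simpa using hmem) hnd
      simpa using this
    simp [h1, hget]
  · have h0 : (pvLabels rule).items.count p = 0 := List.count_eq_zero_of_not_mem hmem
    have hget : ¬ (pvLabels rule).get? p.1 = some p.2 := by
      intro h
      exact hmem (by simpa using PySem.Dict.mem_items_of_get?_eq_some (d := pvLabels rule) h)
    simp [h0]
    intro h; exact absurd h hget

-- count = number of rules ⟺ every rule passes A's per-rule check
theorem pv_cond_iff (rules : List (List (String × List (String × String)))) (p : String × String) :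
    ((rules.map (fun rule => ((pvLabels rule).items.count p : Int))).sum = (rules.length : Int))
      ↔ rules.all (fun rule => (pvLabels rule).get? p.1 == some p.2) = true := by
  induction rules with
  | nil => simp
  | cons r rules ih =>
    simp only [List.map_cons, List.sum_cons, List.length_cons, List.all_cons, Bool.and_eq_true]
    rw [pv_rule_count]
    have hbound : (rules.map (fun rule => ((pvLabels rule).items.count p : Int))).sum
        ≤ (rules.length : Int) := by
      clear ih
      induction rules with
      | nil => simp
      | cons q qs ihq =>
        simp only [List.map_cons, List.sum_cons, List.length_cons]
        rw [pv_rule_count]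
        split_ifs <;> push_cast <;> omega
    constructor
    · intro hsum
      by_cases h : ((pvLabels r).get? p.1 == some p.2) = true
      · refine ⟨h, ih.mp ?_⟩
        rw [if_pos h] at hsum; push_cast at hsum ⊢; omega
      · rw [if_neg h] at hsum
        exfalso; push_cast at hsum hbound; omega
    · rintro ⟨hr, hall⟩
      rw [if_pos hr]
      have hs := ih.mpr hall
      push_cast at hs ⊢; omega

theorem extract_common_fields_spec_aux (alert_rules : List (List (String × List (String × String)))) :
    extract_common_fields alert_rules = extract_common_fields_alt alert_rules := by
  match alert_rules with
  | [] => rfl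
  | r0 :: rest =>
    simp only [extract_common_fields, extract_common_fields_alt]
    have hnd : ((pvLabels r0).items.map Prod.fst).Nodup := PySem.Dict.nodup_keys_ofList _
    rw [show (PySem.Dict.ofList ((PySem.Dict.ofList r0).getD "labels" [])).items
          = (pvLabels r0).items from rfl,
        pv_foldl_insert_items _ _ _ hnd]
    refine congrArg (fun l => [_, ("labels", l)]) (List.filter_congr ?_)
    intro kv _
    congr 1
    rw [pv_counts_getD, PySem.Dict.getD_empty, zero_add]
    have hiff := pv_cond_iff (r0 :: rest) kv
    rw [Bool.eq_iff_iff]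
    simp only [beq_iff_eq]
    exact hiff.symm

-- ===== VERDICT (by name: the statement is the Claim_ definition above) =====
theorem extract_common_fields_spec : Claim_equal_extract_common_fields := by
  intro alert_rules _
  exact extract_common_fields_spec_aux alert_rules
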